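-- pv_equiv track=rewrite | github.com/FCAS-LAB/FHE_ESWEEK | src/mapping.py | calculate_comm_volume
-- ===== SOURCE A (Python) =====
-- def calculate_comm_volume(cuts, s_weight):
--     total_comm_volume = 0
--     for p in range(len(cuts)):
--         for q in range(p + 1, len(cuts)):
--             for v_r in cuts[p]:
--                 for v_s in cuts[q]:
--                     total_comm_volume += s_weight.get((v_r, v_s), 0)
--     return total_comm_volume
-- ===== SOURCE B (Python) =====
-- def calculate_comm_volume(cuts, s_weight):
--     # one counter per cut, built once
--     cnts = []
--     for cut in cuts:
--         c = {}
--         for v in cut: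
--             c[v] = c.get(v, 0) + 1
--         cnts.append(c)
--     total = 0
--     for (r, s), w in s_weight.items():
--         pre = 0  # occurrences of r in earlier cuts
--         for c in cnts:
--             total += w * pre * c.get(s, 0)
--             pre += c.get(r, 0)
--     return total
-- ===== Notes on version B (the rewrite author's own statement) =====
-- stated objective: faster
-- what changed: Replaced the quadruple loop over all partition pairs and vertex pairs by building one occurrence counter per cut and, for each sparse weight key, a single prefix-sum pass over those counters.
import Mathlib
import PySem

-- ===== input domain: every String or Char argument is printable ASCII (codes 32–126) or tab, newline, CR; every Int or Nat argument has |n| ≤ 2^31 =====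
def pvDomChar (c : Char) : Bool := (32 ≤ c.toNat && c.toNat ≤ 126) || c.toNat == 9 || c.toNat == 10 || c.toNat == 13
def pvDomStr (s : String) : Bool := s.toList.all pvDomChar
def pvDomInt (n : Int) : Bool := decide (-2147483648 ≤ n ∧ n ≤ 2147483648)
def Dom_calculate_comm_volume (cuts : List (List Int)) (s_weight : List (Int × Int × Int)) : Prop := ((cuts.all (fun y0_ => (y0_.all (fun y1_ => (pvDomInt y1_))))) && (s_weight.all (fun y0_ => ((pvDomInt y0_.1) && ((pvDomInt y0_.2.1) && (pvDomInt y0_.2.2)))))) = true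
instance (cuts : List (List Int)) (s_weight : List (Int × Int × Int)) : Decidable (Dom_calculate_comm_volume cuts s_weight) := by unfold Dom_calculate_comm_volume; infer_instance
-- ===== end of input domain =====

-- B replaces A's quadruple loop (all partition pairs × all vertex pairs, one dict lookup each)
-- by per-cut occurrence counters built once plus a single prefix-sum pass over the cuts per weight key.

-- ===== PORT A =====
-- s_weight.get((v_r, v_s), 0): first-match lookup in the association list (= the dict lookup; keys unique by Pre_)
def swGet (sw : List (Int × Int × Int)) (r s : Int) : Int :=
  match sw with
  | [] => 0
  | (a, b, w) :: t => if a = r ∧ b = s then w else swGet t r s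

def calculate_comm_volume (cuts : List (List Int)) (s_weight : List (Int × Int × Int)) : Int :=
  (PySem.List.pyRange 0 cuts.length 1).foldl (fun acc p =>
    (PySem.List.pyRange (p + 1) cuts.length 1).foldl (fun acc q =>
      (PySem.List.pyGetD cuts p []).foldl (fun acc v_r =>
        (PySem.List.pyGetD cuts q []).foldl (fun acc v_s =>
          acc + swGet s_weight v_r v_s) acc) acc) acc) 0

-- ===== PORT B =====
def calculate_comm_volume_alt (cuts : List (List Int)) (s_weight : List (Int × Int × Int)) : Int :=
  let cnts : List (PySem.Dict Int Int) :=
    cuts.foldl (fun acc cut =>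
      acc ++ [cut.foldl (fun c v => c.insert v (c.getD v 0 + 1)) PySem.Dict.empty]) []
  s_weight.foldl (fun total e =>
    (cnts.foldl (fun (st : Int × Int) c =>
        (st.1 + e.2.2 * st.2 * c.getD e.2.1 0, st.2 + c.getD e.1 0)) (total, 0)).1) 0

-- ===== PRECONDITION & SPEC =====
-- Pre_ only states that s_weight is a valid encoding of the Python dict both functions receive:
-- its keys (the first two components) are pairwise distinct — a Python dict cannot carry duplicate keys.
def Pre_calculate_comm_volume (cuts : List (List Int)) (s_weight : List (Int × Int × Int)) : Prop :=
  List.Pairwise (fun a b => ¬ (a.1 = b.1 ∧ a.2.1 = b.2.1)) s_weight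
instance (cuts : List (List Int)) (s_weight : List (Int × Int × Int)) : Decidable (Pre_calculate_comm_volume cuts s_weight) := by unfold Pre_calculate_comm_volume; infer_instance

def pvWitness_calculate_comm_volume : List (List Int) × (List (Int × Int × Int)) :=
  ([[1, 2], [3], [1]], [(1, 3, 5), (2, 3, 7), (3, 1, 2)])

def Spec_calculate_comm_volume (cuts : List (List Int)) (s_weight : List (Int × Int × Int)) (out : Int) : Prop := out = calculate_comm_volume_alt cuts s_weight
instance (cuts : List (List Int)) (s_weight : List (Int × Int × Int)) (out : Int) : Decidable (Spec_calculate_comm_volume cuts s_weight out) := by unfold Spec_calculate_comm_volume; infer_instance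

-- ===== CLAIM (what is proved, stated in full; the proofs are below) =====
def Claim_equal_calculate_comm_volume : Prop := ∀ (cuts : List (List Int)) (s_weight : List (Int × Int × Int)), Dom_calculate_comm_volume cuts s_weight → Pre_calculate_comm_volume cuts s_weight → Spec_calculate_comm_volume cuts s_weight (calculate_comm_volume cuts s_weight)

-- ===== LEMMAS AND PROOFS =====

-- total occurrences of v over a list of cuts
def cntS (v : Int) (l : List (List Int)) : Int := (l.map (fun c => (c.count v : Int))).sum

-- per-key multiplicity-weighted number of cross-partition ordered pairs
def Hkey (e : Int × Int × Int) : List (List Int) → Int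
  | [] => 0
  | c :: t => (c.count e.1 : Int) * cntS e.2.1 t + Hkey e t

-- contribution of one ordered pair of cuts, written as a sum over the weight list
def Gp (sw : List (Int × Int × Int)) (C D : List Int) : Int :=
  (sw.map (fun e => e.2.2 * (C.count e.1 : Int) * (D.count e.2.1 : Int))).sum

-- pair-sum over all ordered pairs of distinct cuts (A's loop structure)
def PS (sw : List (Int × Int × Int)) : List (List Int) → Int
  | [] => 0
  | c :: t => (t.map (fun D => Gp sw c D)).sum + PS sw t

-- the counter one cut is turned into by B
def counterO (cut : List Int) : PySem.Dict Int Int :=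
  cut.foldl (fun c v => c.insert v (c.getD v 0 + 1)) PySem.Dict.empty

lemma sum_ite_mul (b w : Int) (D : List Int) :
    ((D.map (fun s' => if b = s' then w else 0)).sum) = w * (D.count b : Int) := by
  induction D with
  | nil => simp
  | cons h t ih => simp [List.count_cons, ih]; split_ifs with h1 h2 h3 <;> ring_nf <;> simp_all

lemma sum_comm_list {α β : Type} (l : List α) (m : List β) (g : α → β → Int) :
    (l.map (fun x => (m.map (fun y => g x y)).sum)).sum
      = (m.map (fun y => (l.map (fun x => g x y)).sum)).sum := by
  induction l with
  | nil => simp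
  | cons x t ih => simp [ih]

lemma swGet_eq_sum (sw : List (Int × Int × Int)) (r s : Int)
    (h : List.Pairwise (fun a b => ¬ (a.1 = b.1 ∧ a.2.1 = b.2.1)) sw) :
    swGet sw r s = (sw.map (fun e => if e.1 = r ∧ e.2.1 = s then e.2.2 else 0)).sum := by
  induction sw with
  | nil => simp [swGet]
  | cons e t ih =>
    obtain ⟨a, b, w⟩ := e
    rw [List.pairwise_cons] at h
    by_cases hm : a = r ∧ b = s
    · simp only [swGet, hm, List.map_cons, List.sum_cons]
      have : (t.map (fun e => if e.1 = r ∧ e.2.1 = s then e.2.2 else 0)).sum = 0 := by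
        apply List.sum_eq_zero
        intro x hx
        simp only [List.mem_map] at hx
        obtain ⟨e, he, rfl⟩ := hx
        have := h.1 e he
        simp only at this
        rw [if_neg]
        rintro ⟨h1, h2⟩
        exact this ⟨by rw [h1, hm.1], by rw [h2, hm.2]⟩
      simp [this]
    · simp only [swGet, hm, List.map_cons, List.sum_cons, ih h.2]
      simp

lemma double_eq (sw : List (Int × Int × Int))
    (h : List.Pairwise (fun a b => ¬ (a.1 = b.1 ∧ a.2.1 = b.2.1)) sw)
    (acc : Int) (C D : List Int) :
    C.foldl (fun acc r' => D.foldl (fun acc s' => acc + swGet sw r' s') acc) acc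
      = acc + Gp sw C D := by
  simp only [PySem.List.foldl_add]
  have hkey : (C.map (fun r' => (D.map (fun s' => swGet sw r' s')).sum)).sum = Gp sw C D := ?_
  · rw [hkey]
  have hg : ∀ r' s', swGet sw r' s' = (sw.map (fun e => if e.1 = r' ∧ e.2.1 = s' then e.2.2 else 0)).sum :=
    fun r' s' => swGet_eq_sum sw r' s' h
  simp only [hg]
  rw [show (fun r' => (D.map (fun s' => (sw.map (fun e => if e.1 = r' ∧ e.2.1 = s' then e.2.2 else 0)).sum)).sum)
        = (fun r' => (sw.map (fun e => if e.1 = r' then e.2.2 * (D.count e.2.1 : Int) else 0)).sum) from ?_]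
  · rw [sum_comm_list C sw]
    unfold Gp
    congr 1
    apply List.map_congr_left
    intro e _
    rw [sum_ite_mul e.1 (e.2.2 * (D.count e.2.1 : Int)) C]
    ring
  · funext r'
    rw [sum_comm_list D sw]
    congr 1
    apply List.map_congr_left
    intro e _
    by_cases h1 : e.1 = r'
    · simp only [h1, true_and, if_true]
      exact sum_ite_mul e.2.1 e.2.2 D
    · simp [h1]

lemma outer_drop (sw : List (Int × Int × Int)) (cuts : List (List Int)) :
    ∀ (k a : Nat) (acc : Int), k = cuts.length - a →
    (PySem.List.pyRange (a : Int) (cuts.length : Int) 1).foldl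
      (fun acc p => acc + ((cuts.drop (p + 1).toNat).map
        (fun D => Gp sw (PySem.List.pyGetD cuts p []) D)).sum) acc
      = acc + PS sw (cuts.drop a) := by
  intro k
  induction k with
  | zero =>
    intro a acc hk
    have ha : cuts.length ≤ a := by omega
    rw [PySem.List.pyRange_one_eq_nil (by exact_mod_cast ha)]
    simp [List.drop_eq_nil_of_le ha, PS]
  | succ k ih =>
    intro a acc hk
    have ha : a < cuts.length := by omega
    rw [PySem.List.pyRange_one_cons (by exact_mod_cast ha)]
    simp only [List.foldl_cons]
    have hcast : ((a : Int) + 1) = ((a + 1 : Nat) : Int) := by push_cast; ring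
    rw [hcast, ih (a + 1) _ (by omega)]
    have hget : PySem.List.pyGetD cuts (a : Int) [] = cuts[a] := by
      rw [PySem.List.pyGetD_natCast]; exact List.getD_eq_getElem cuts [] ha
    rw [List.drop_eq_getElem_cons ha]
    simp only [PS, hget, Int.toNat_natCast]
    ring

lemma A_eq_PS (cuts : List (List Int)) (sw : List (Int × Int × Int))
    (h : List.Pairwise (fun a b => ¬ (a.1 = b.1 ∧ a.2.1 = b.2.1)) sw) :
    calculate_comm_volume cuts sw = PS sw cuts := by
  unfold calculate_comm_volume
  have hbody : ∀ (acc : Int) (p : Int), p ∈ PySem.List.pyRange 0 (cuts.length : Int) 1 →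
      (PySem.List.pyRange (p + 1) (cuts.length : Int) 1).foldl (fun acc q =>
        (PySem.List.pyGetD cuts p []).foldl (fun acc v_r =>
          (PySem.List.pyGetD cuts q []).foldl (fun acc v_s =>
            acc + swGet sw v_r v_s) acc) acc) acc
      = acc + ((cuts.drop (p + 1).toNat).map
          (fun D => Gp sw (PySem.List.pyGetD cuts p []) D)).sum := by
    intro acc p hp
    rw [PySem.List.mem_pyRange_one] at hp
    simp only [double_eq sw h]
    rw [PySem.List.foldl_pyRange_pyGetD' cuts [] (fun acc D => acc + Gp sw (PySem.List.pyGetD cuts p []) D) acc (by omega : (0:Int) ≤ p + 1)]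
    rw [PySem.List.foldl_add]
  rw [PySem.List.foldl_congr_mem _ _ (fun acc p => acc + ((cuts.drop (p + 1).toNat).map (fun D => Gp sw (PySem.List.pyGetD cuts p []) D)).sum) _ hbody]
  have := outer_drop sw cuts (cuts.length) 0 0 (by omega)
  simpa using this

lemma PS_eq_sum_H (sw : List (Int × Int × Int)) (cuts : List (List Int)) :
    PS sw cuts = (sw.map (fun e => e.2.2 * Hkey e cuts)).sum := by
  induction cuts with
  | nil => simp [PS, Hkey]
  | cons c t ih =>
    simp only [PS, ih, Gp]
    rw [sum_comm_list t sw]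
    rw [← PySem.List.sum_map_add_int]
    congr 1
    apply List.map_congr_left
    intro e _
    simp only [Hkey, cntS]
    rw [List.sum_map_mul_left]
    ring

lemma counterO_getD (cut : List Int) (x : Int) : (counterO cut).getD x 0 = (cut.count x : Int) := by
  unfold counterO
  rw [PySem.Dict.getD_foldl_insert_add_one]
  simp

lemma Bfold (r s w : Int) : ∀ (l : List (List Int)) (t0 p0 : Int),
    ((l.map counterO).foldl (fun st c =>
        (st.1 + w * st.2 * c.getD s 0, st.2 + c.getD r 0)) (t0, p0)).1
      = t0 + w * (p0 * cntS s l + Hkey (r, s, w) l) := by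
  intro l
  induction l with
  | nil => intro t0 p0; simp [cntS, Hkey]
  | cons c t ih =>
    intro t0 p0
    simp only [List.map_cons, List.foldl_cons, counterO_getD, ih]
    simp only [cntS, Hkey, List.map_cons, List.sum_cons]
    ring

lemma B_eq_sum_H (cuts : List (List Int)) (sw : List (Int × Int × Int)) :
    calculate_comm_volume_alt cuts sw = (sw.map (fun e => e.2.2 * Hkey e cuts)).sum := by
  unfold calculate_comm_volume_alt
  simp only [PySem.List.foldl_append_singleton_eq_map, List.nil_append]
  have hbody : ∀ (total : Int) (e : Int × Int × Int), e ∈ sw →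
      ((cuts.map (fun cut => cut.foldl (fun c v => c.insert v (c.getD v 0 + 1)) PySem.Dict.empty)).foldl
        (fun (st : Int × Int) c => (st.1 + e.2.2 * st.2 * c.getD e.2.1 0, st.2 + c.getD e.1 0)) (total, 0)).1
      = total + e.2.2 * Hkey e cuts := by
    intro total e _
    have hmap : (cuts.map (fun cut => List.foldl (fun c v => c.insert v (c.getD v 0 + 1)) PySem.Dict.empty cut)) = cuts.map counterO := rfl
    rw [hmap, Bfold e.1 e.2.1 e.2.2 cuts total 0]
    simp
  rw [PySem.List.foldl_congr_mem _ _ (fun total e => total + e.2.2 * Hkey e cuts) _ hbody]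
  rw [PySem.List.foldl_add]
  simp

-- ===== VERDICT (by name: the statement is the Claim_ definition above) =====
theorem calculate_comm_volume_spec : Claim_equal_calculate_comm_volume := by
  intro cuts sw _ hpre
  unfold Spec_calculate_comm_volume
  rw [A_eq_PS cuts sw hpre, PS_eq_sum_H, B_eq_sum_H]
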